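-- pv_equiv track=rewrite | github.com/eric1610/Programming_Practice | CodeJam_2019_Round_A/Training.py | lowest_score
-- ===== SOURCE A (Python) =====
-- def lowest_score(student_skills, chosen_students):
--     student_skills.sort()
--     lowest = 0
--     for num in range(chosen_students - 1):
--         lowest += student_skills[chosen_students - 1] - student_skills[num]
--     curr_lowest = lowest
--     for num in range(chosen_students, len(student_skills)):
--         lowest = lowest + (student_skills[num] - student_skills[num - 1]) * (chosen_students - 1) \
--             - (student_skills[num - 1] - student_skills[num - chosen_students])
--         if lowest < curr_lowest:
--             curr_lowest = lowest
--     return curr_lowest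
-- ===== SOURCE B (Python) =====
-- def lowest_score(student_skills, chosen_students):
--     student_skills.sort()
--     best = None
--     for start in range(len(student_skills) - chosen_students + 1):
--         top = student_skills[start + chosen_students - 1]
--         cost = sum(top - x for x in student_skills[start:start + chosen_students])
--         if best is None or cost < best:
--             best = cost
--     return best
-- ===== Notes on version B (the rewrite author's own statement) =====
-- stated objective: simpler
-- what changed: Replaces A's incremental sliding-window update (carrying the previous window's cost and adjusting it algebraically) by a direct recomputation of each sorted window's cost as sum(top - x) with a running minimum.
-- outside the precondition, e.g. on lowest_score([], 1): A returns 0, B returns None; on lowest_score([], 0): A returns 0, B raises IndexError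
import Mathlib
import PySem

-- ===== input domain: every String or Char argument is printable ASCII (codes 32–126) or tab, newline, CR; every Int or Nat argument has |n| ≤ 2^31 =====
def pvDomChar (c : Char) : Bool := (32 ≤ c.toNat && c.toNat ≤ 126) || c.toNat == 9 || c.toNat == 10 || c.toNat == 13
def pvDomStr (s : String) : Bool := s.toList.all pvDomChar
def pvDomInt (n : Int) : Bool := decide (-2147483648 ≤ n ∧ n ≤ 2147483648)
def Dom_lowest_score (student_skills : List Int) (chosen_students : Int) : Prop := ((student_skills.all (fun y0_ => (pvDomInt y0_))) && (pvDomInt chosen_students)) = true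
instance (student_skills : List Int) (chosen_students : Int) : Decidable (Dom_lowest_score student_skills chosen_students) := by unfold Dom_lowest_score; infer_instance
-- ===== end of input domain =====

-- B recomputes each sorted window's cost directly (sum of top minus element) and takes the running
-- minimum, instead of A's incremental telescoping update of the previous window's cost (objective:
-- simpler).  Both A and B sort the argument list in place; the equivalence is about the return value.

-- ===== PORT A =====
def lowest_score (student_skills : List Int) (chosen_students : Int) : Int :=
  let t := PySem.List.sorted student_skills (fun x => x) false
  let lowest : Int := (PySem.List.pyRange 0 (chosen_students - 1) 1).foldl
    (fun acc num => acc + (PySem.List.pyGetD t (chosen_students - 1) 0 - PySem.List.pyGetD t num 0)) 0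
  let st := (PySem.List.pyRange chosen_students (t.length : Int) 1).foldl
    (fun (p : Int × Int) num =>
      let l := p.1 + (PySem.List.pyGetD t num 0 - PySem.List.pyGetD t (num - 1) 0) * (chosen_students - 1)
                 - (PySem.List.pyGetD t (num - 1) 0 - PySem.List.pyGetD t (num - chosen_students) 0)
      (l, if l < p.2 then l else p.2)) (lowest, lowest)
  st.2

-- ===== PORT B =====
def lowest_score_alt (student_skills : List Int) (chosen_students : Int) : Int :=
  let t := PySem.List.sorted student_skills (fun x => x) false
  let best := (PySem.List.pyRange 0 ((t.length : Int) - chosen_students + 1) 1).foldl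
    (fun (best : Option Int) start =>
      let top := PySem.List.pyGetD t (start + chosen_students - 1) 0
      let cost := (PySem.List.slice t (some start) (some (start + chosen_students))).foldl
        (fun acc x => acc + (top - x)) 0
      match best with
      | none => some cost
      | some b => some (if cost < b then cost else b)) none
  best.getD 0

-- ===== PRECONDITION & SPEC =====
-- Pre_ excludes chosen_students > len (A raises IndexError for chosen_students ≥ 2) and
-- chosen_students < 0 (A raises IndexError), plus the two empty-list corners ([], 0) and ([], 1),
-- on which A's 0 comes from its loop ranges being empty while B naturally raises or returns None.
def Pre_lowest_score (student_skills : List Int) (chosen_students : Int) : Prop :=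
  (1 ≤ chosen_students ∧ chosen_students ≤ student_skills.length) ∨
    (chosen_students = 0 ∧ student_skills ≠ [])
instance (student_skills : List Int) (chosen_students : Int) : Decidable (Pre_lowest_score student_skills chosen_students) := by unfold Pre_lowest_score; infer_instance

def pvWitness_lowest_score : List Int × Int := ([3, 1, 4, 1, 5], 2)

def Spec_lowest_score (student_skills : List Int) (chosen_students : Int) (out : Int) : Prop := out = lowest_score_alt student_skills chosen_students
instance (student_skills : List Int) (chosen_students : Int) (out : Int) : Decidable (Spec_lowest_score student_skills chosen_students out) := by unfold Spec_lowest_score; infer_instance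

-- ===== CLAIM (what is proved, stated in full; the proofs are below) =====
def Claim_equal_lowest_score : Prop := ∀ (student_skills : List Int) (chosen_students : Int), Dom_lowest_score student_skills chosen_students → Pre_lowest_score student_skills chosen_students → Spec_lowest_score student_skills chosen_students (lowest_score student_skills chosen_students)

-- ===== LEMMAS AND PROOFS =====

-- the sorted list's i-th element (0 past the end)
def pvG (t : List Int) (i : Nat) : Int := t.getD i 0

-- cost of the window of size K starting at s: sum over the window of (window max - element)
def pvC (t : List Int) (K : Nat) (s : Nat) : Int :=
  ((List.range K).map (fun i => pvG t (s + K - 1) - pvG t (s + i))).sum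

-- running minimum of window costs over a list of window starts
def pvMin (t : List Int) (K : Nat) (c : Int) (l : List Nat) : Int :=
  l.foldl (fun acc s => if pvC t K s < acc then pvC t K s else acc) c

lemma pvSum_range (f : Nat -> Int) (n : Nat) :
    ((List.range n).map f).sum = Finset.sum (Finset.range n) f := by
  induction n with
  | zero => simp
  | succ n ih =>
    rw [List.range_succ, List.map_append, List.sum_append, Finset.sum_range_succ, ih]; simp

lemma pvC_zero (t : List Int) (K : Nat) (hK : 1 <= K) :
    ((List.range (K - 1)).map (fun i => pvG t (K - 1) - pvG t i)).sum = pvC t K 0 := by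
  unfold pvC
  obtain ⟨K', rfl⟩ : ∃ K', K = K' + 1 := ⟨K - 1, by omega⟩
  simp [List.range_succ, List.map_append, List.sum_append]

lemma pvC_succ (t : List Int) (K : Nat) (hK : 1 <= K) (j : Nat) :
    pvC t K (j + 1) =
      pvC t K j + (pvG t (j + K) - pvG t (j + K - 1)) * ((K : Int) - 1)
        - (pvG t (j + K - 1) - pvG t j) := by
  have hsum : forall s : Nat, pvC t K s
      = (K : Int) * pvG t (s + K - 1) - Finset.sum (Finset.range K) (fun i => pvG t (s + i)) := by
    intro s
    unfold pvC
    rw [pvSum_range]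
    rw [Finset.sum_sub_distrib, Finset.sum_const, Finset.card_range]
    simp
  obtain ⟨K', rfl⟩ : ∃ K', K = K' + 1 := ⟨K - 1, by omega⟩
  have hshift : (Finset.sum (Finset.range (K' + 1)) (fun i => pvG t (j + 1 + i)))
      = (Finset.sum (Finset.range (K' + 1)) (fun i => pvG t (j + i))) + pvG t (j + (K' + 1)) - pvG t j := by
    rw [Finset.sum_range_succ' (fun i => pvG t (j + i)) K']
    rw [Finset.sum_range_succ (fun i => pvG t (j + 1 + i)) K']
    have he : ∀ i, j + 1 + i = j + (i + 1) := by omega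
    simp only [he, Nat.add_zero]
    ring
  rw [hsum, hsum, hshift]
  have h1 : j + 1 + (K' + 1) - 1 = j + (K' + 1) := by omega
  have h2 : j + (K' + 1) - 1 = j + K' := by omega
  rw [h1, h2]
  push_cast
  ring

lemma pvWindow_eq (t : List Int) (K s : Nat) (hs : s + K <= t.length) :
    (t.drop s).take K = (List.range K).map (fun i => pvG t (s + i)) := by
  apply List.ext_getElem
  · simp; omega
  · intro i h1 h2
    have hi : i < K := by simpa using h2
    have hsi : s + i < t.length := by omega
    simp [pvG, List.getD_eq_getElem?_getD, List.getElem?_eq_getElem hsi]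

-- A's first loop computes the cost of the first window
lemma pvA_first (t : List Int) (K : Nat) (hK : 1 <= K) :
    (PySem.List.pyRange 0 ((K : Int) - 1) 1).foldl
      (fun acc num => acc + (PySem.List.pyGetD t ((K : Int) - 1) 0 - PySem.List.pyGetD t num 0)) 0
      = pvC t K 0 := by
  rw [PySem.List.pyRange_one, PySem.List.foldl_add, List.map_map]
  have hn : (((K : Int) - 1) - 0).toNat = K - 1 := by omega
  rw [hn]
  have hmap : List.map ((fun num => PySem.List.pyGetD t ((K : Int) - 1) 0 - PySem.List.pyGetD t num 0) ∘ fun k : Nat => (0 : Int) + (k : Int)) (List.range (K - 1))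
      = List.map (fun i => pvG t (K - 1) - pvG t i) (List.range (K - 1)) := by
    apply List.map_congr_left
    intro i _
    have hc : ((K : Int) - 1) = ((K - 1 : Nat) : Int) := by omega
    simp [Function.comp, hc, PySem.List.pyGetD_natCast, pvG]
  rw [hmap, pvC_zero t K hK]
  omega

-- A's second loop: from state (pvC j, c) it reaches (pvC (j+m), running min of c and later costs)
lemma pvA_loop (t : List Int) (K : Nat) (hK : 1 <= K) :
    ∀ (m j : Nat) (c : Int),
      ((List.range m).map (fun i => ((K + j + i : Nat) : Int))).foldl
        (fun (p : Int × Int) num =>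
          let l := p.1 + (PySem.List.pyGetD t num 0 - PySem.List.pyGetD t (num - 1) 0) * ((K : Int) - 1)
                     - (PySem.List.pyGetD t (num - 1) 0 - PySem.List.pyGetD t (num - (K : Int)) 0)
          (l, if l < p.2 then l else p.2)) (pvC t K j, c)
      = (pvC t K (j + m), pvMin t K c (List.range' (j + 1) m)) := by
  intro m
  induction m with
  | zero => intro j c; simp [pvMin]
  | succ m ih =>
    intro j c
    rw [List.range_succ_eq_map, List.map_cons, List.foldl_cons, List.map_map]
    have harg : List.map ((fun i => ((K + j + i : Nat) : Int)) ∘ Nat.succ) (List.range m)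
        = List.map (fun i => ((K + (j + 1) + i : Nat) : Int)) (List.range m) := by
      apply List.map_congr_left
      intro i _
      simp only [Function.comp_apply, Nat.succ_eq_add_one]
      omega
    have h1 : ((K + j + 0 : Nat) : Int) - 1 = ((j + K - 1 : Nat) : Int) := by omega
    have h2 : ((K + j + 0 : Nat) : Int) - (K : Int) = ((j : Nat) : Int) := by omega
    have h3 : forall d : Int, PySem.List.pyGetD t ((K + j + 0 : Nat) : Int) d = t.getD (j + K) d := by
      intro d
      rw [PySem.List.pyGetD_natCast]
      congr 1
      omega
    simp only [h1, h2, h3, PySem.List.pyGetD_natCast]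
    have hstep : pvC t K j + ((t.getD (j + K) 0 : Int) - t.getD (j + K - 1) 0) * ((K : Int) - 1)
          - ((t.getD (j + K - 1) 0 : Int) - t.getD j 0) = pvC t K (j + 1) := by
      rw [pvC_succ t K hK j]; simp [pvG]
    rw [harg, hstep, ih (j + 1)]
    have hr : List.range' (j + 1) (m + 1) = (j + 1) :: List.range' (j + 2) m := by
      rw [List.range'_succ]
    rw [hr]
    have hm : j + (m + 1) = j + 1 + m := by omega
    rw [hm]
    rfl

-- B's loop body, named for the proofs (definitionally equal to the port's lambda)
def pvCost (t : List Int) (K : Nat) (start : Int) : Int :=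
  List.foldl (fun acc x => acc + (PySem.List.pyGetD t (start + (K : Int) - 1) 0 - x)) 0
    (PySem.List.slice t (some start) (some (start + (K : Int))))

def pvStepB (t : List Int) (K : Nat) (best : Option Int) (start : Int) : Option Int :=
  match best with
  | none => some (pvCost t K start)
  | some b => some (if pvCost t K start < b then pvCost t K start else b)

-- B's per-window cost equals pvC
lemma pvB_cost (t : List Int) (K s : Nat) (hK : 1 <= K) (hs : s + K <= t.length) :
    pvCost t K ((s : Nat) : Int) = pvC t K s := by
  unfold pvCost
  have hidx : ((s : Nat) : Int) + (K : Int) - 1 = ((s + K - 1 : Nat) : Int) := by omega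
  rw [PySem.List.slice_natCast_add, PySem.List.foldl_add, pvWindow_eq t K s hs, List.map_map]
  simp only [hidx, PySem.List.pyGetD_natCast]
  unfold pvC pvG
  simp [Function.comp_def]

-- B's option fold with a some-accumulator is the running minimum
lemma pvB_loop (t : List Int) (K : Nat) (hK : 1 <= K) :
    ∀ (l : List Nat) (b : Int), (∀ s ∈ l, s + K <= t.length) →
      ((l.map (fun s => ((s : Nat) : Int))).foldl (pvStepB t K) (some b))
      = some (pvMin t K b l) := by
  intro l
  induction l with
  | nil => intro b _; simp [pvMin]
  | cons s l ih =>
    intro b hb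
    rw [List.map_cons, List.foldl_cons]
    have hstep : pvStepB t K (some b) ((s : Nat) : Int)
        = some (if pvC t K s < b then pvC t K s else b) := by
      rw [← pvB_cost t K s hK (hb s (by simp))]; rfl
    rw [hstep, ih _ (fun x hx => hb x (by simp [hx]))]
    rfl

-- chosen_students = 0: every incremental update of A cancels to 0, and every window of B is empty
lemma pvA_zero_fold (t : List Int) : ∀ (l : List Int) (c : Int),
    l.foldl (fun (p : Int × Int) (num : Int) =>
      (p.1 + (PySem.List.pyGetD t num 0 - PySem.List.pyGetD t (num - 1) 0) * (0 - 1) -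
          (PySem.List.pyGetD t (num - 1) 0 - PySem.List.pyGetD t (num - 0) 0),
        if p.1 + (PySem.List.pyGetD t num 0 - PySem.List.pyGetD t (num - 1) 0) * (0 - 1) -
            (PySem.List.pyGetD t (num - 1) 0 - PySem.List.pyGetD t (num - 0) 0) < p.2 then
          p.1 + (PySem.List.pyGetD t num 0 - PySem.List.pyGetD t (num - 1) 0) * (0 - 1) -
            (PySem.List.pyGetD t (num - 1) 0 - PySem.List.pyGetD t (num - 0) 0)
        else p.2)) (c, c) = (c, c) := by
  intro l
  induction l with
  | nil => intro c; rfl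
  | cons x l ih =>
    intro c
    rw [List.foldl_cons]
    have hz : c + (PySem.List.pyGetD t x 0 - PySem.List.pyGetD t (x - 1) 0) * (0 - 1) -
        (PySem.List.pyGetD t (x - 1) 0 - PySem.List.pyGetD t (x - 0) 0) = c := by
      rw [sub_zero]; ring
    simp only [hz]
    simpa using ih c

lemma pvA_zero (xs : List Int) : lowest_score xs 0 = 0 := by
  unfold lowest_score
  set t := PySem.List.sorted xs (fun x => x) false with ht
  have h0 : PySem.List.pyRange 0 ((0 : Int) - 1) 1 = [] :=
    PySem.List.pyRange_one_eq_nil (by omega)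
  rw [h0]
  simp only [List.foldl_nil]
  show ((PySem.List.pyRange 0 ((t.length : Nat) : Int) 1).foldl (fun (p : Int × Int) (num : Int) =>
      (p.1 + (PySem.List.pyGetD t num 0 - PySem.List.pyGetD t (num - 1) 0) * (0 - 1) -
          (PySem.List.pyGetD t (num - 1) 0 - PySem.List.pyGetD t (num - 0) 0),
        if p.1 + (PySem.List.pyGetD t num 0 - PySem.List.pyGetD t (num - 1) 0) * (0 - 1) -
            (PySem.List.pyGetD t (num - 1) 0 - PySem.List.pyGetD t (num - 0) 0) < p.2 then
          p.1 + (PySem.List.pyGetD t num 0 - PySem.List.pyGetD t (num - 1) 0) * (0 - 1) -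
            (PySem.List.pyGetD t (num - 1) 0 - PySem.List.pyGetD t (num - 0) 0)
        else p.2)) ((0 : Int), (0 : Int))).2 = (0 : Int)
  rw [pvA_zero_fold t _ 0]

lemma pvCost_zero (t : List Int) (start : Int) : pvCost t 0 start = 0 := by
  unfold pvCost
  have h1 : start + ((0 : Nat) : Int) = start := by omega
  rw [h1]
  have hs : PySem.List.slice t (some start) (some start) = [] := by
    apply List.eq_nil_of_length_eq_zero
    rw [PySem.List.length_slice]
    omega
  rw [hs]
  rfl

lemma pvStepB_zero_const (t : List Int) : ∀ (l : List Int), l.foldl (pvStepB t 0) (some 0) = some 0 := by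
  intro l
  induction l with
  | nil => rfl
  | cons x l ih =>
    rw [List.foldl_cons]
    have hx : pvStepB t 0 (some 0) x = some 0 := by
      have h1 : pvStepB t 0 (some 0) x
          = some (if pvCost t 0 x < 0 then pvCost t 0 x else 0) := rfl
      rw [h1, pvCost_zero]
      simp
    rw [hx, ih]

lemma pvB_zero (xs : List Int) : lowest_score_alt xs 0 = 0 := by
  unfold lowest_score_alt
  set t := PySem.List.sorted xs (fun x => x) false with ht
  show (List.foldl (pvStepB t 0) none (PySem.List.pyRange 0 ((t.length : Int) - 0 + 1) 1)).getD 0 = 0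
  rw [PySem.List.pyRange_one]
  have hn : (((t.length : Int) - 0 + 1) - 0).toNat = t.length + 1 := by omega
  rw [hn, List.range_eq_range', List.range'_succ, List.map_cons, List.foldl_cons]
  have h0 : pvStepB t 0 none ((0 : Int) + (((0 : Nat)) : Int)) = some 0 := by
    rw [← pvCost_zero t ((0 : Int) + (((0 : Nat)) : Int))]
    rfl
  rw [h0, pvStepB_zero_const]
  rfl

lemma pvA_main (xs : List Int) (k : Int) (h1 : 1 <= k) (h2 : k <= xs.length) :
    lowest_score xs k
      = pvMin (PySem.List.sorted xs (fun x => x) false) k.toNat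
          (pvC (PySem.List.sorted xs (fun x => x) false) k.toNat 0)
          (List.range' 1 ((PySem.List.sorted xs (fun x => x) false).length - k.toNat)) := by
  unfold lowest_score
  set t := PySem.List.sorted xs (fun x => x) false with ht
  set K := k.toNat with hKdef
  have hlen : t.length = xs.length := by rw [ht, PySem.List.length_sorted]
  have hk : (K : Int) = k := by omega
  have hK1 : 1 <= K := by omega
  have hKn : K <= t.length := by omega
  simp only [← hk]
  rw [pvA_first t K hK1]
  have hrange : PySem.List.pyRange (K : Int) (t.length : Int) 1
      = (List.range (t.length - K)).map (fun i => ((K + 0 + i : Nat) : Int)) := by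
    rw [PySem.List.pyRange_one]
    have hn : (((t.length : Int)) - (K : Int)).toNat = t.length - K := by omega
    rw [hn]
    apply List.map_congr_left
    intro i _
    omega
  rw [hrange, pvA_loop t K hK1 (t.length - K) 0 (pvC t K 0)]

lemma pvB_main (xs : List Int) (k : Int) (h1 : 1 <= k) (h2 : k <= xs.length) :
    lowest_score_alt xs k
      = pvMin (PySem.List.sorted xs (fun x => x) false) k.toNat
          (pvC (PySem.List.sorted xs (fun x => x) false) k.toNat 0)
          (List.range' 1 ((PySem.List.sorted xs (fun x => x) false).length - k.toNat)) := by
  unfold lowest_score_alt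
  set t := PySem.List.sorted xs (fun x => x) false with ht
  set K := k.toNat with hKdef
  have hlen : t.length = xs.length := by rw [ht, PySem.List.length_sorted]
  have hk : (K : Int) = k := by omega
  have hK1 : 1 <= K := by omega
  have hKn : K <= t.length := by omega
  simp only [← hk]
  have hrange : PySem.List.pyRange 0 ((t.length : Int) - (K : Int) + 1) 1
      = (List.range (t.length - K + 1)).map (fun s => ((s : Nat) : Int)) := by
    rw [PySem.List.pyRange_one]
    have hn : (((t.length : Int) - (K : Int) + 1) - 0).toNat = t.length - K + 1 := by omega
    rw [hn]
    apply List.map_congr_left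
    intro i _
    omega
  rw [hrange]
  show (List.foldl (pvStepB t K) none
      ((List.range (t.length - K + 1)).map (fun s => ((s : Nat) : Int)))).getD 0
    = pvMin t K (pvC t K 0) (List.range' 1 (t.length - K))
  have hsplit : List.range (t.length - K + 1) = 0 :: List.range' 1 (t.length - K) := by
    rw [List.range_eq_range', List.range'_succ]
  rw [hsplit, List.map_cons, List.foldl_cons]
  have h0 : pvStepB t K none (((0 : Nat) : Int)) = some (pvC t K 0) := by
    rw [← pvB_cost t K 0 hK1 (by omega)]; rfl
  rw [h0]
  rw [pvB_loop t K hK1 (List.range' 1 (t.length - K)) (pvC t K 0)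
    (fun s hs => by
      have := List.mem_range'.mp hs
      omega)]
  rfl

-- ===== VERDICT (by name: the statement is the Claim_ definition above) =====
theorem lowest_score_spec : Claim_equal_lowest_score := by
  intro xs k _ hpre
  unfold Spec_lowest_score
  rcases hpre with ⟨h1, h2⟩ | ⟨hk0, _⟩
  · rw [pvA_main xs k h1 h2, pvB_main xs k h1 h2]
  · subst hk0
    rw [pvA_zero, pvB_zero]
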